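-- pv_equiv track=rewrite | github.com/MetOffice/SimSys_Scripts | suite_report.py | create_approval_table
-- ===== SOURCE A (Python) =====
-- def create_approval_table(needed_approvals, mode):
--     """
--     Function to write out the trac.log table for config and CO approvals
--     Input: needed_approvals - dictionary with keys as owners and values,
--                               a list of configs or code sections
--            mode - either "config" or "code" depending on which type of table
--                   is being created
--     """
--
--     table = ["'''Required " + mode.capitalize() + " Owner Approvals'''"]
--
--     if mode == "config":
--         table += [" || '''Owner''' || '''Approval''' || '''Configs''' || "]
--     else:
--         table += [
--             " || '''Owner (Deputy)''' || '''Approval''' || "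
--             + "'''Code Section''' || "
--         ]
--
--     if needed_approvals is None:
--         table += [
--             " |||||| No UM "
--             + mode.capitalize()
--             + " Owner Approvals Required || "
--         ]
--     else:
--         for owner in needed_approvals.keys():
--             row = " || " + owner + " || Pending || "
--             count = 0
--             for val in needed_approvals[owner]:
--                 if count == 3:
--                     row += "[[br]]"
--                     count = 0
--                 row += "{{{" + val + "}}} "
--                 count += 1
--             row += " || "
--             table.append(row)
--
--     table.append("")
--
--     return table
-- ===== SOURCE B (Python) =====
-- def _cells(vals):
--     """Render vals as chunk-of-3 strings joined by [[br]] (structural grouping, no counter)."""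
--     if not vals:
--         return ""
--     head = "".join("{{{" + v + "}}} " for v in vals[:3])
--     if len(vals) <= 3:
--         return head
--     return head + "[[br]]" + _cells(vals[3:])
--
--
-- def create_approval_table(needed_approvals, mode):
--     cap = mode.capitalize()
--     table = ["'''Required " + cap + " Owner Approvals'''"]
--     if mode == "config":
--         table.append(" || '''Owner''' || '''Approval''' || '''Configs''' || ")
--     else:
--         table.append(
--             " || '''Owner (Deputy)''' || '''Approval''' || "
--             + "'''Code Section''' || "
--         )
--     if needed_approvals is None:
--         table.append(" |||||| No UM " + cap + " Owner Approvals Required || ")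
--     else:
--         table.extend(
--             " || " + owner + " || Pending || " + _cells(list(vals)) + " || "
--             for owner, vals in needed_approvals.items()
--         )
--     table.append("")
--     return table
-- ===== Notes on version B (the rewrite author's own statement) =====
-- stated objective: simpler
-- what changed: The per-owner running counter/reset row loop is replaced by a structural pass: split the values into chunks of 3, render each chunk, and join the chunk strings with "[[br]]".
import Mathlib
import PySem

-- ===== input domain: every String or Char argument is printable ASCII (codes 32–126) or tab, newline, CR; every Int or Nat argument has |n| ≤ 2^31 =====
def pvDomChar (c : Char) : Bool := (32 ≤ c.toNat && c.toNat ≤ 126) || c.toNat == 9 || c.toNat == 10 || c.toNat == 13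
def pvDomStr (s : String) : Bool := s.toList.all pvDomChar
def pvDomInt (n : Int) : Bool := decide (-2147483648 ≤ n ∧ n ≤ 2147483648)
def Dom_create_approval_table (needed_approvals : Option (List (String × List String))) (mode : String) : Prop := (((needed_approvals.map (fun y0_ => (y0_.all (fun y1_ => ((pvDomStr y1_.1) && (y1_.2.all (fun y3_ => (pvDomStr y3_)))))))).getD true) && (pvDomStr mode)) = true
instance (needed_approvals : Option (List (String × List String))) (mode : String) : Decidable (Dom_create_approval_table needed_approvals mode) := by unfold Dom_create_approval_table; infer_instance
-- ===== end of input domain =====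

-- B replaces A's running counter/reset row loop by a structural chunk-of-3 grouping joined with "[[br]]" (objective: simpler decomposition, same cost).


-- shared primitive: Python str.capitalize() — first char upper, rest lower; exact on the ASCII domain
def pyCapitalize (s : String) : String :=
  match s.toList with
  | [] => ""
  | c :: rest => String.ofList (PySem.Chars.upperChar c :: PySem.Chars.lower rest)

-- ===== PORT A =====
-- A's inner for-loop over vals with (row, count) state, counter reset at 3
def loopA : List String → String → Nat → String
  | [], row, _ => row
  | v :: rest, row, count =>
    let row := if count == 3 then row ++ "[[br]]" else row
    let count := if count == 3 then 0 else count
    loopA rest (row ++ "{{{" ++ v ++ "}}} ") (count + 1)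

def create_approval_table (needed_approvals : Option (List (String × List String))) (mode : String) : List String :=
  let table := ["'''Required " ++ pyCapitalize mode ++ " Owner Approvals'''"]
  let table := if mode == "config" then
      table ++ [" || '''Owner''' || '''Approval''' || '''Configs''' || "]
    else
      table ++ [" || '''Owner (Deputy)''' || '''Approval''' || " ++ "'''Code Section''' || "]
  let table :=
    match needed_approvals with
    | none => table ++ [" |||||| No UM " ++ pyCapitalize mode ++ " Owner Approvals Required || "]
    | some pairs =>
      -- 'for owner in needed_approvals.keys(): … needed_approvals[owner]' iterates the dict's
      -- (key, value) pairs in insertion order = the association-list pairs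
      pairs.foldl (fun t p =>
        t ++ [loopA p.2 (" || " ++ p.1 ++ " || Pending || ") 0 ++ " || "]) table
  table ++ [""]

-- ===== PORT B =====
-- B's _cells: render vals[:3], recurse on vals[3:], join chunks with "[[br]]"
def cellsB (vals : List String) : String :=
  if vals = [] then ""
  else
    let head := PySem.Str.join ""
      ((PySem.List.slice vals none (some 3)).map (fun v => "{{{" ++ v ++ "}}} "))
    if vals.length ≤ 3 then head
    else head ++ "[[br]]" ++ cellsB (PySem.List.slice vals (some 3) none)
termination_by vals.length
decreasing_by
  simp [PySem.List.slice_some_none]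
  omega

def create_approval_table_alt (needed_approvals : Option (List (String × List String))) (mode : String) : List String :=
  let cap := pyCapitalize mode
  let table := ["'''Required " ++ cap ++ " Owner Approvals'''"]
  let table := if mode == "config" then
      table ++ [" || '''Owner''' || '''Approval''' || '''Configs''' || "]
    else
      table ++ [" || '''Owner (Deputy)''' || '''Approval''' || " ++ "'''Code Section''' || "]
  let table :=
    match needed_approvals with
    | none => table ++ [" |||||| No UM " ++ cap ++ " Owner Approvals Required || "]
    | some pairs =>
      table ++ pairs.map (fun p => " || " ++ p.1 ++ " || Pending || " ++ cellsB p.2 ++ " || ")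
  table ++ [""]

-- ===== PRECONDITION & SPEC =====
def Spec_create_approval_table (needed_approvals : Option (List (String × List String))) (mode : String) (out : List String) : Prop := out = create_approval_table_alt needed_approvals mode
instance (needed_approvals : Option (List (String × List String))) (mode : String) (out : List String) : Decidable (Spec_create_approval_table needed_approvals mode out) := by unfold Spec_create_approval_table; infer_instance

-- ===== CLAIM (what is proved, stated in full; the proofs are below) =====
def Claim_equal_create_approval_table : Prop := ∀ (needed_approvals : Option (List (String × List String))) (mode : String), Dom_create_approval_table needed_approvals mode → Spec_create_approval_table needed_approvals mode (create_approval_table needed_approvals mode)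

-- ===== LEMMAS AND PROOFS =====

theorem join_empty_two (a b : String) : PySem.Str.join "" [a, b] = a ++ b := by
  simp [PySem.Str.join, PySem.Chars.join_cons_cons, PySem.Chars.join_singleton]

theorem join_empty_three (a b c : String) : PySem.Str.join "" [a, b, c] = a ++ b ++ c := by
  simp [PySem.Str.join, PySem.Chars.join_cons_cons, PySem.Chars.join_singleton,
    String.append_assoc]

theorem join_empty_one (a : String) : PySem.Str.join "" [a] = a := by
  simp [PySem.Str.join, PySem.Chars.join_singleton]

-- the heart: A's counter loop renders exactly B's chunk join, for any accumulated row prefix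
theorem loopA_eq_cellsB (vals : List String) : ∀ row : String,
    loopA vals row 0 = row ++ cellsB vals := by
  induction vals using cellsB.induct with
  | case1 => intro row; simp [loopA, cellsB]
  | case2 vals hne hle =>
    intro row
    rcases vals with _ | ⟨a, _ | ⟨b, _ | ⟨c, _ | ⟨d, rest⟩⟩⟩⟩
    · exact absurd rfl hne
    · rw [cellsB]
      simp [loopA, PySem.List.slice_to, join_empty_one]
      apply String.toList_inj.mp; simp [String.toList_append]
    · rw [cellsB]
      simp [loopA, PySem.List.slice_to, join_empty_two]
      apply String.toList_inj.mp; simp [String.toList_append]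
    · rw [cellsB]
      simp [loopA, PySem.List.slice_to, join_empty_three]
      apply String.toList_inj.mp; simp [String.toList_append]
    · simp at hle; omega
  | case3 vals hne hgt ih =>
    intro row
    obtain ⟨a, b, c, d, rest, rfl⟩ : ∃ a b c d rest, vals = a::b::c::d::rest := by
      rcases vals with _ | ⟨a, _ | ⟨b, _ | ⟨c, _ | ⟨d, rest⟩⟩⟩⟩ <;>
        first
          | (exact ⟨a, b, c, d, rest, rfl⟩)
          | (exfalso; simp at hgt)
    have hfrom : PySem.List.slice (a::b::c::d::rest) (some 3) none = d::rest := by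
      rw [PySem.List.slice_from _ (show (0:Int) ≤ 3 by norm_num)]; rfl
    have hto : PySem.List.slice (a::b::c::d::rest) none (some 3) = [a, b, c] := by
      rw [PySem.List.slice_to _ (show (0:Int) ≤ 3 by norm_num)]; rfl
    have ih' := ih (row ++ "{{{" ++ a ++ "}}} " ++ "{{{" ++ b ++ "}}} " ++ "{{{" ++ c ++ "}}} " ++ "[[br]]")
    rw [hfrom] at ih'
    have step : loopA (a::b::c::d::rest) row 0
        = loopA (d::rest) (row ++ "{{{" ++ a ++ "}}} " ++ "{{{" ++ b ++ "}}} " ++ "{{{" ++ c ++ "}}} " ++ "[[br]]") 0 := by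
      simp only [loopA]
      congr 1
    rw [step, ih']
    conv_rhs => rw [cellsB]
    simp only [if_neg hne, if_neg hgt, hto, hfrom, List.map, join_empty_three]
    apply String.toList_inj.mp; simp [String.toList_append]

theorem foldl_append_map {α : Type} (f : α → String) :
    ∀ (pairs : List α) (t : List String),
      pairs.foldl (fun t p => t ++ [f p]) t = t ++ pairs.map f := by
  intro pairs
  induction pairs with
  | nil => simp
  | cons p rest ih => intro t; simp [List.foldl, ih, List.append_assoc]

-- ===== VERDICT (by name: the statement is the Claim_ definition above) =====
theorem create_approval_table_spec : Claim_equal_create_approval_table := by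
  intro na mode _
  unfold Spec_create_approval_table create_approval_table create_approval_table_alt
  cases na with
  | none => rfl
  | some pairs =>
    simp only [foldl_append_map (fun p : String × List String =>
      loopA p.2 (" || " ++ p.1 ++ " || Pending || ") 0 ++ " || ")]
    congr 2
    apply List.map_congr_left
    intro p _
    rw [loopA_eq_cellsB, String.append_assoc]
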